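-- pv_equiv track=rewrite | github.com/immersinn/nba_analytics | eventsHelper.py | playersForEventsQuarter
-- ===== SOURCE A (Python) =====
-- def playersForEventsQuarter(qes, team, lookup, team_names):
--     players = [set() for _ in qes]
--     for i,s in enumerate(qes):
--         if s['Team'] == team:
--             if s['Event'] not in ['SUB_IN', 'SUB_OUT']:
--                 if s['Player'].lower() not in team_names:
--                     p = s['Player']
--                     players[i].update([p])
--                     for j in reversed(list(range(i))):
--                         if qes[j]['Player'] != p:
--                             players[j].update([p])
--                         else:
--                             break
--                     for j in range(i+1, len(qes)):
--                         if qes[j]['Player'] != p: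
--                             players[j].update([p])
--                         else:
--                             break
--                 else:
--                     pass
--             elif s['Event'] == 'SUB_OUT':
--                 p = s['Player']
--                 players[i].update([p])
--                 for j in reversed(list(range(i))):
--                     if qes[j]['Player'] != p:
--                         players[j].update([p])
--                     else:
--                         break
--             elif s['Event'] == 'SUB_IN':
--                 p = s['Player']
--                 players[i].update([p])
--                 for j in range(i+1, len(qes)):
--                     if qes[j]['Player'] != p:
--                         players[j].update([p])
--                     else:
--                         break
--         else:
--             pass
--     players = [sorted([lookup[p] for p in pl]) for pl in players]
--     return(players)
-- ===== SOURCE B (Python) =====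
-- def playersForEventsQuarter(qes, team, lookup, team_names):
--     # Gather formulation: for each index k, collect directly the players whose
--     # propagated interval covers k, instead of scattering writes from each event.
--     n = len(qes)
--
--     def clear(lo, hi, p):
--         # no occurrence of p as Player in positions [lo, hi)
--         return all(qes[j]['Player'] != p for j in range(lo, hi))
--
--     out = []
--     for k in range(n):
--         names = set()
--         for i, s in enumerate(qes):
--             if s['Team'] != team:
--                 continue
--             ev = s['Event']
--             if ev in ('SUB_IN', 'SUB_OUT'):
--                 back = ev == 'SUB_OUT'
--                 fwd = ev == 'SUB_IN'
--             else:
--                 if s['Player'].lower() in team_names: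
--                     continue
--                 back = fwd = True
--             p = s['Player']
--             if k == i or (k < i and back and clear(k, i, p)) \
--                     or (i < k and fwd and clear(i + 1, k + 1, p)):
--                 names.add(p)
--         out.append(sorted(lookup[q] for q in names))
--     return out
-- ===== Notes on version B (the rewrite author's own statement) =====
-- stated objective: alternative
-- what changed: A scatters: for each qualifying event it walks outward writing the player into neighbouring indices' sets; B gathers: for each index k it tests every event once with an explicit closed coverage predicate (k inside the event's propagation interval, i.e. no intervening occurrence of the same Player value) and collects the covering players directly, so no per-index mutable set array is kept.
import Mathlib
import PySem

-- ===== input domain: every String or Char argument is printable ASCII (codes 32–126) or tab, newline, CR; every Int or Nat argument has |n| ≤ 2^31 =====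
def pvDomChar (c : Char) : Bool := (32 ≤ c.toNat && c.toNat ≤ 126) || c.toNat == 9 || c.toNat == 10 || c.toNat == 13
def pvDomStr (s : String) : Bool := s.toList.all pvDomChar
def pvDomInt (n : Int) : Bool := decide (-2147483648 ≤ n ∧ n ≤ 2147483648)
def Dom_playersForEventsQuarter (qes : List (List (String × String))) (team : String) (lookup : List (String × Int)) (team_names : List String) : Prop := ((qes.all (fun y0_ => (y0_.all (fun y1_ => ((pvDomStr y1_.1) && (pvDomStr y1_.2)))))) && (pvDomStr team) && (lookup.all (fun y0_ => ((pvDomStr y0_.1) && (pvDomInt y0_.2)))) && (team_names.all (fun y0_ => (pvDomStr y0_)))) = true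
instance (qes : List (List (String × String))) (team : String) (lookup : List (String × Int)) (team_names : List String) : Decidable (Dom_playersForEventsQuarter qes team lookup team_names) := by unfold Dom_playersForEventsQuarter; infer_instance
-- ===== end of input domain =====

-- B re-states A as a gather: per index k it tests each event once with a closed coverage
-- predicate instead of A's outward scatter writes into a mutable array of sets ("alternative").

-- ===== PORT A =====
-- s[k] on an event dict (value of key k; "" only reached outside Pre_, where Python raises KeyError)
def pvGetS (e : List (String × String)) (k : String) : String :=
  ((PySem.Dict.mk e).get? k).getD ""

-- qes[j]['Player']
def pvPlayerAt (qes : List (List (String × String))) (j : Nat) : String :=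
  pvGetS (qes.getD j []) "Player"

-- A's backward while-break loop: 'for j in reversed(range(i)): if qes[j]['Player'] != p: players[j].update([p]) else: break'
def pvFillBack (qes : List (List (String × String))) (p : String) :
    Nat → List (PySem.Set String) → List (PySem.Set String)
  | 0, pls => pls
  | j + 1, pls =>
      if pvPlayerAt qes j ≠ p then
        pvFillBack qes p j (pls.modify j (fun t => PySem.Set.add t p))
      else pls

-- A's forward while-break loop: 'for j in range(i+1, len(qes)): …'
def pvFillFwd (qes : List (List (String × String))) (p : String)
    (j : Nat) (pls : List (PySem.Set String)) : List (PySem.Set String) :=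
  if h : j < qes.length then
    if pvPlayerAt qes j ≠ p then
      pvFillFwd qes p (j + 1) (pls.modify j (fun t => PySem.Set.add t p))
    else pls
  else pls
termination_by qes.length - j

def playersForEventsQuarter (qes : List (List (String × String))) (team : String) (lookup : List (String × Int)) (team_names : List String) : List (List Int) :=
  let players0 : List (PySem.Set String) := qes.map (fun _ => ([] : PySem.Set String))
  let players := (List.range qes.length).foldl (fun pls i =>
    let s := qes.getD i []
    if pvGetS s "Team" = team then
      if ¬ (pvGetS s "Event" ∈ (["SUB_IN", "SUB_OUT"] : List String)) then
        if ¬ (PySem.Str.lower (pvGetS s "Player") ∈ team_names) then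
          let p := pvGetS s "Player"
          pvFillFwd qes p (i + 1)
            (pvFillBack qes p i (pls.modify i (fun t => PySem.Set.add t p)))
        else pls
      else if pvGetS s "Event" = "SUB_OUT" then
        let p := pvGetS s "Player"
        pvFillBack qes p i (pls.modify i (fun t => PySem.Set.add t p))
      else if pvGetS s "Event" = "SUB_IN" then
        let p := pvGetS s "Player"
        pvFillFwd qes p (i + 1) (pls.modify i (fun t => PySem.Set.add t p))
      else pls
    else pls) players0
  players.map (fun pl =>
    PySem.List.sorted (pl.map (fun q => ((PySem.Dict.mk lookup).get? q).getD 0)) (fun x => x) false)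

-- ===== PORT B =====
-- Source B's clear(lo, hi, p): no occurrence of p as Player in positions [lo, hi)
def pvClear (qes : List (List (String × String))) (lo hi : Nat) (p : String) : Bool :=
  (List.range' lo (hi - lo)).all (fun j => pvPlayerAt qes j ≠ p)

-- Source B's final coverage test + conditional names.add(p)
def pvAddIf (qes : List (List (String × String))) (p : String) (k i : Nat)
    (back fwd : Bool) (names : PySem.Set String) : PySem.Set String :=
  if k = i ∨ (k < i ∧ back = true ∧ pvClear qes k i p = true)
      ∨ (i < k ∧ fwd = true ∧ pvClear qes (i + 1) (k + 1) p = true) then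
    PySem.Set.add names p
  else names

def playersForEventsQuarter_alt (qes : List (List (String × String))) (team : String) (lookup : List (String × Int)) (team_names : List String) : List (List Int) :=
  (List.range qes.length).map (fun k =>
    let names := (List.range qes.length).foldl (fun names i =>
      let s := qes.getD i []
      if pvGetS s "Team" ≠ team then names
      else
        let ev := pvGetS s "Event"
        if ev = "SUB_IN" ∨ ev = "SUB_OUT" then
          pvAddIf qes (pvGetS s "Player") k i (decide (ev = "SUB_OUT")) (decide (ev = "SUB_IN")) names
        else if PySem.Str.lower (pvGetS s "Player") ∈ team_names then names
        else pvAddIf qes (pvGetS s "Player") k i true true names) PySem.Set.empty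
    PySem.List.sorted (names.map (fun q => ((PySem.Dict.mk lookup).get? q).getD 0)) (fun x => x) false)

-- ===== PRECONDITION & SPEC =====
-- Pre_ excludes exactly the KeyError inputs: every event needs a 'Team' key; an event of the
-- given team needs 'Event' and 'Player' keys, and its player must be a key of lookup when it is
-- collected; and once ANY event contributes, the scans of either program may read any event's
-- 'Player' field, so then all events must carry one (A reads only the fields its own scans
-- reach, so it can return on inputs with an unscanned Player-less event, while B — which tests
-- coverage per index — reads more of them and raises KeyError there).
def Pre_playersForEventsQuarter (qes : List (List (String × String))) (team : String) (lookup : List (String × Int)) (team_names : List String) : Prop :=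
  (∀ e ∈ qes, (PySem.Dict.mk e).contains "Team" = true ∧
    (pvGetS e "Team" = team →
      (PySem.Dict.mk e).contains "Event" = true ∧
      (PySem.Dict.mk e).contains "Player" = true ∧
      ((pvGetS e "Event" = "SUB_IN" ∨ pvGetS e "Event" = "SUB_OUT" ∨
          PySem.Str.lower (pvGetS e "Player") ∉ team_names) →
        (PySem.Dict.mk lookup).contains (pvGetS e "Player") = true))) ∧
  ((∃ e ∈ qes, pvGetS e "Team" = team ∧
      (pvGetS e "Event" = "SUB_IN" ∨ pvGetS e "Event" = "SUB_OUT" ∨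
        PySem.Str.lower (pvGetS e "Player") ∉ team_names)) →
    ∀ e ∈ qes, (PySem.Dict.mk e).contains "Player" = true)
instance (qes : List (List (String × String))) (team : String) (lookup : List (String × Int)) (team_names : List String) : Decidable (Pre_playersForEventsQuarter qes team lookup team_names) := by unfold Pre_playersForEventsQuarter; infer_instance

def pvWitness_playersForEventsQuarter : (List (List (String × String))) × String × (List (String × Int)) × List String :=
  ([[("Team", "t"), ("Event", "SHOT"), ("Player", "a")],
    [("Team", "u"), ("Player", "b")],
    [("Team", "t"), ("Event", "SUB_OUT"), ("Player", "b")]],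
   "t", [("a", 7), ("b", 3)], ["x"])

def Spec_playersForEventsQuarter (qes : List (List (String × String))) (team : String) (lookup : List (String × Int)) (team_names : List String) (out : List (List Int)) : Prop := out = playersForEventsQuarter_alt qes team lookup team_names
instance (qes : List (List (String × String))) (team : String) (lookup : List (String × Int)) (team_names : List String) (out : List (List Int)) : Decidable (Spec_playersForEventsQuarter qes team lookup team_names out) := by unfold Spec_playersForEventsQuarter; infer_instance

-- ===== CLAIM (what is proved, stated in full; the proofs are below) =====
def Claim_equal_playersForEventsQuarter : Prop := ∀ (qes : List (List (String × String))) (team : String) (lookup : List (String × Int)) (team_names : List String), Dom_playersForEventsQuarter qes team lookup team_names → Pre_playersForEventsQuarter qes team lookup team_names → Spec_playersForEventsQuarter qes team lookup team_names (playersForEventsQuarter qes team lookup team_names)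

-- ===== LEMMAS AND PROOFS =====

-- the common coverage condition both programs realise for an event at i and an index k
def pvCov (qes : List (List (String × String))) (p : String) (k i : Nat)
    (back fwd : Bool) : Prop :=
  k = i ∨ (k < i ∧ back = true ∧ ∀ m, k ≤ m → m < i → pvPlayerAt qes m ≠ p)
    ∨ (i < k ∧ fwd = true ∧ ∀ m, i + 1 ≤ m → m < k + 1 → pvPlayerAt qes m ≠ p)

-- which events contribute which player, with which directions (shared shape of both branches)
def pvEvtSpec (qes : List (List (String × String))) (team : String)
    (team_names : List String) (i : Nat) (p : String) (back fwd : Bool) : Prop :=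
  let s := qes.getD i []
  pvGetS s "Team" = team ∧ p = pvGetS s "Player" ∧
    ((pvGetS s "Event" = "SUB_IN" ∨ pvGetS s "Event" = "SUB_OUT") ∧
        back = decide (pvGetS s "Event" = "SUB_OUT") ∧ fwd = decide (pvGetS s "Event" = "SUB_IN")
      ∨ ¬ (pvGetS s "Event" = "SUB_IN" ∨ pvGetS s "Event" = "SUB_OUT") ∧
        ¬ PySem.Str.lower (pvGetS s "Player") ∈ team_names ∧ back = true ∧ fwd = true)

-- B's per-event step, named for the proofs (definitionally the lambda in the _alt port)
def pvStepB (qes : List (List (String × String))) (team : String)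
    (team_names : List String) (k : Nat) (names : PySem.Set String) (i : Nat) :
    PySem.Set String :=
  let s := qes.getD i []
  if pvGetS s "Team" ≠ team then names
  else
    let ev := pvGetS s "Event"
    if ev = "SUB_IN" ∨ ev = "SUB_OUT" then
      pvAddIf qes (pvGetS s "Player") k i (decide (ev = "SUB_OUT")) (decide (ev = "SUB_IN")) names
    else if PySem.Str.lower (pvGetS s "Player") ∈ team_names then names
    else pvAddIf qes (pvGetS s "Player") k i true true names

-- the name q lands in index k's set because of some event in l
def pvHit (qes : List (List (String × String))) (team : String)
    (team_names : List String) (l : List Nat) (k : Nat) (q : String) : Prop :=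
  ∃ i ∈ l, ∃ back fwd, pvEvtSpec qes team team_names i q back fwd ∧ pvCov qes q k i back fwd

lemma pvGetD_modify (pls : List (PySem.Set String)) (i k : Nat)
    (f : PySem.Set String → PySem.Set String) :
    (pls.modify i f).getD k [] =
      if i = k ∧ k < pls.length then f (pls.getD k []) else pls.getD k [] := by
  by_cases hk : k < pls.length
  · rw [List.getD_eq_getElem _ _ (by simpa using hk), List.getD_eq_getElem _ _ hk,
      List.getElem_modify]
    split_ifs with h1 h2 h3 <;> simp_all
  · rw [List.getD_eq_default _ _ (by simpa using Nat.le_of_not_lt hk),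
      List.getD_eq_default _ _ (Nat.le_of_not_lt hk)]
    simp [hk]

lemma pvClear_iff (qes : List (List (String × String))) (lo hi : Nat) (p : String) :
    pvClear qes lo hi p = true ↔ ∀ m, lo ≤ m → m < hi → pvPlayerAt qes m ≠ p := by
  unfold pvClear
  rw [List.all_eq_true]
  constructor
  · intro h m h1 h2
    have := h m (by rw [List.mem_range'_1]; omega)
    simpa using this
  · intro h m hm
    rw [List.mem_range'_1] at hm
    simpa using h m hm.1 (by omega)

lemma mem_pvAddIf (qes : List (List (String × String))) (p : String) (k i : Nat)
    (back fwd : Bool) (names : PySem.Set String) (q : String) :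
    q ∈ pvAddIf qes p k i back fwd names ↔
      q ∈ names ∨ (q = p ∧ pvCov qes p k i back fwd) := by
  unfold pvAddIf pvCov
  split_ifs with hc
  · rw [PySem.Set.mem_add]
    constructor
    · rintro (h | rfl)
      · exact Or.inl h
      · refine Or.inr ⟨rfl, ?_⟩
        rcases hc with h | ⟨h1, h2, h3⟩ | ⟨h1, h2, h3⟩
        · exact Or.inl h
        · exact Or.inr (Or.inl ⟨h1, h2, (pvClear_iff _ _ _ _).mp h3⟩)
        · exact Or.inr (Or.inr ⟨h1, h2, (pvClear_iff _ _ _ _).mp h3⟩)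
    · rintro (h | ⟨rfl, hcov⟩)
      · exact Or.inl h
      · exact Or.inr rfl
  · constructor
    · exact Or.inl
    · rintro (h | ⟨rfl, hcov⟩)
      · exact h
      · refine absurd ?_ hc
        rcases hcov with h | ⟨h1, h2, h3⟩ | ⟨h1, h2, h3⟩
        · exact Or.inl h
        · exact Or.inr (Or.inl ⟨h1, h2, (pvClear_iff _ _ _ _).mpr h3⟩)
        · exact Or.inr (Or.inr ⟨h1, h2, (pvClear_iff _ _ _ _).mpr h3⟩)

lemma memB_step (qes : List (List (String × String))) (team : String)
    (team_names : List String) (k i : Nat) (names : PySem.Set String) (q : String) :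
    q ∈ pvStepB qes team team_names k names i ↔
      q ∈ names ∨ pvHit qes team team_names [i] k q := by
  have hhit : pvHit qes team team_names [i] k q ↔
      ∃ back fwd, pvEvtSpec qes team team_names i q back fwd ∧ pvCov qes q k i back fwd := by
    simp [pvHit]
  rw [hhit]
  simp only [pvEvtSpec]
  unfold pvStepB
  by_cases ht : pvGetS (qes.getD i []) "Team" ≠ team
  · rw [if_pos ht]
    constructor
    · exact Or.inl
    · rintro (h | ⟨back, fwd, ⟨hteam, _⟩, _⟩)
      · exact h
      · exact absurd hteam ht
  · rw [if_neg ht]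
    rw [not_not] at ht
    by_cases hev : pvGetS (qes.getD i []) "Event" = "SUB_IN" ∨ pvGetS (qes.getD i []) "Event" = "SUB_OUT"
    · rw [if_pos hev, mem_pvAddIf]
      constructor
      · rintro (h | ⟨rfl, hcov⟩)
        · exact Or.inl h
        · exact Or.inr ⟨_, _, ⟨ht, rfl, Or.inl ⟨hev, rfl, rfl⟩⟩, hcov⟩
      · rintro (h | ⟨back, fwd, ⟨_, rfl, hspec⟩, hcov⟩)
        · exact Or.inl h
        · rcases hspec with ⟨_, rfl, rfl⟩ | ⟨hns, _⟩
          · exact Or.inr ⟨rfl, hcov⟩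
          · exact absurd hev hns
    · rw [if_neg hev]
      by_cases htn : PySem.Str.lower (pvGetS (qes.getD i []) "Player") ∈ team_names
      · rw [if_pos htn]
        constructor
        · exact Or.inl
        · rintro (h | ⟨back, fwd, ⟨_, rfl, hspec⟩, hcov⟩)
          · exact h
          · rcases hspec with ⟨hs, _⟩ | ⟨_, hns, _⟩
            · exact absurd hs hev
            · exact absurd htn hns
      · rw [if_neg htn, mem_pvAddIf]
        constructor
        · rintro (h | ⟨rfl, hcov⟩)
          · exact Or.inl h
          · exact Or.inr ⟨true, true, ⟨ht, rfl, Or.inr ⟨hev, htn, rfl, rfl⟩⟩, hcov⟩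
        · rintro (h | ⟨back, fwd, ⟨_, rfl, hspec⟩, hcov⟩)
          · exact Or.inl h
          · rcases hspec with ⟨hs, _⟩ | ⟨_, _, rfl, rfl⟩
            · exact absurd hs hev
            · exact Or.inr ⟨rfl, hcov⟩

-- ---- B-side characterisation ----
lemma memB (qes : List (List (String × String))) (team : String)
    (team_names : List String) (l : List Nat) (k : Nat) (q : String)
    (s : PySem.Set String) :
    q ∈ l.foldl (pvStepB qes team team_names k) s ↔
      q ∈ s ∨ pvHit qes team team_names l k q := by
  induction l generalizing s with
  | nil => simp [pvHit]
  | cons i l ih =>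
    rw [List.foldl_cons, ih, memB_step]
    simp only [pvHit, List.mem_cons, List.not_mem_nil, or_false, exists_eq_left]
    constructor
    · rintro ((h | hstep) | ⟨i', hi', hrest⟩)
      · exact Or.inl h
      · exact Or.inr ⟨i, Or.inl rfl, hstep⟩
      · exact Or.inr ⟨i', Or.inr hi', hrest⟩
    · rintro (h | ⟨i', rfl | hi', hrest⟩)
      · exact Or.inl (Or.inl h)
      · exact Or.inl (Or.inr hrest)
      · exact Or.inr ⟨i', hi', hrest⟩

lemma nodupB (qes : List (List (String × String))) (team : String)
    (team_names : List String) (l : List Nat) (k : Nat) (s : PySem.Set String)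
    (hs : s.Nodup) :
    (l.foldl (pvStepB qes team team_names k) s).Nodup := by
  induction l generalizing s with
  | nil => exact hs
  | cons i l ih =>
    refine ih _ ?_
    unfold pvStepB pvAddIf
    dsimp only
    split_ifs <;> first | exact hs | exact PySem.Set.nodup_add _ _ hs

-- ---- A-side characterisation ----
lemma length_fillBack (qes : List (List (String × String))) (p : String) (j : Nat)
    (pls : List (PySem.Set String)) : (pvFillBack qes p j pls).length = pls.length := by
  induction j generalizing pls with
  | zero => rfl
  | succ j ih =>
    unfold pvFillBack
    split
    · rw [ih]; simp
    · rfl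

lemma length_fillFwd (qes : List (List (String × String))) (p : String) (j : Nat)
    (pls : List (PySem.Set String)) : (pvFillFwd qes p j pls).length = pls.length := by
  fun_induction pvFillFwd with
  | case1 j pls h hne ih => rw [ih]; simp
  | case2 => rfl
  | case3 => rfl

lemma mem_fillBack (qes : List (List (String × String))) (p : String) (j : Nat)
    (pls : List (PySem.Set String)) (k : Nat) (q : String) :
    q ∈ (pvFillBack qes p j pls).getD k [] ↔
      q ∈ pls.getD k [] ∨ (q = p ∧ k < j ∧ k < pls.length ∧ ∀ m, k ≤ m → m < j → pvPlayerAt qes m ≠ p) := by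
  induction j generalizing pls with
  | zero => simp [pvFillBack]
  | succ j ih =>
    unfold pvFillBack
    by_cases h : pvPlayerAt qes j ≠ p
    · rw [if_pos h, ih, pvGetD_modify]
      have hlm : (pls.modify j (fun t => PySem.Set.add t p)).length = pls.length := by simp
      rw [hlm]
      constructor
      · rintro (hmem | ⟨rfl, h1, h2, h3⟩)
        · split_ifs at hmem with hc
          · rcases (PySem.Set.mem_add _ _ _).mp hmem with hq | rfl
            · exact Or.inl hq
            · exact Or.inr ⟨rfl, by omega, hc.2, fun m hm1 hm2 => by
                have : m = j := by omega
                subst this; exact h⟩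
          · exact Or.inl hmem
        · exact Or.inr ⟨rfl, by omega, h2, fun m hm1 hm2 => by
            by_cases hm : m = j
            · subst hm; exact h
            · exact h3 m hm1 (by omega)⟩
      · rintro (hmem | ⟨rfl, h1, h2, h3⟩)
        · left
          split_ifs with hc
          · exact (PySem.Set.mem_add _ _ _).mpr (Or.inl hmem)
          · exact hmem
        · by_cases hk : k = j
          · subst hk
            left
            rw [if_pos ⟨rfl, h2⟩]
            exact (PySem.Set.mem_add _ _ _).mpr (Or.inr rfl)
          · exact Or.inr ⟨rfl, by omega, h2, fun m hm1 hm2 => h3 m hm1 (by omega)⟩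
    · rw [if_neg h]
      rw [not_not] at h
      constructor
      · exact Or.inl
      · rintro (hmem | ⟨rfl, h1, h2, h3⟩)
        · exact hmem
        · exact absurd h (h3 j (by omega) (by omega))

lemma mem_fillFwd (qes : List (List (String × String))) (p : String) (j : Nat)
    (pls : List (PySem.Set String)) (k : Nat) (hlen : pls.length = qes.length) :
    ∀ q, q ∈ (pvFillFwd qes p j pls).getD k [] ↔
      q ∈ pls.getD k [] ∨ (q = p ∧ j ≤ k ∧ k < qes.length ∧ ∀ m, j ≤ m → m ≤ k → pvPlayerAt qes m ≠ p) := by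
  fun_induction pvFillFwd with
  | case1 j pls hj hne ih =>
    intro q
    have hlm : (pls.modify j (fun t => PySem.Set.add t p)).length = pls.length := by simp
    rw [ih (by rw [hlm, hlen]), pvGetD_modify]
    constructor
    · rintro (hmem | ⟨rfl, h1, h2, h3⟩)
      · split_ifs at hmem with hc
        · rcases (PySem.Set.mem_add _ _ _).mp hmem with hq | rfl
          · exact Or.inl hq
          · exact Or.inr ⟨rfl, by omega, by omega, fun m hm1 hm2 => by
              have : m = j := by omega
              subst this; exact hne⟩
        · exact Or.inl hmem
      · exact Or.inr ⟨rfl, by omega, h2, fun m hm1 hm2 => by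
          by_cases hm : m = j
          · subst hm; exact hne
          · exact h3 m (by omega) hm2⟩
    · rintro (hmem | ⟨rfl, h1, h2, h3⟩)
      · left
        split_ifs with hc
        · exact (PySem.Set.mem_add _ _ _).mpr (Or.inl hmem)
        · exact hmem
      · by_cases hk : k = j
        · subst hk
          left
          rw [if_pos ⟨rfl, by omega⟩]
          exact (PySem.Set.mem_add _ _ _).mpr (Or.inr rfl)
        · exact Or.inr ⟨rfl, by omega, h2, fun m hm1 hm2 => h3 m (by omega) hm2⟩
  | case2 j pls hj hne =>
    intro q
    rw [not_not] at hne
    constructor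
    · exact Or.inl
    · rintro (hmem | ⟨rfl, h1, h2, h3⟩)
      · exact hmem
      · exact absurd hne (h3 j (by omega) h1)
  | case3 j pls hj =>
    intro q
    constructor
    · exact Or.inl
    · rintro (hmem | ⟨rfl, h1, h2, h3⟩)
      · exact hmem
      · omega

lemma nodup_fillBack (qes : List (List (String × String))) (p : String) (j : Nat)
    (pls : List (PySem.Set String)) (h : ∀ k, (pls.getD k []).Nodup) :
    ∀ k, ((pvFillBack qes p j pls).getD k []).Nodup := by
  induction j generalizing pls with
  | zero => exact h
  | succ j ih =>
    unfold pvFillBack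
    split
    · exact ih _ (fun k => by
        rw [pvGetD_modify]
        split_ifs
        · exact PySem.Set.nodup_add _ _ (h k)
        · exact h k)
    · exact h

lemma nodup_fillFwd (qes : List (List (String × String))) (p : String) (j : Nat)
    (pls : List (PySem.Set String)) (h : ∀ k, (pls.getD k []).Nodup) :
    ∀ k, ((pvFillFwd qes p j pls).getD k []).Nodup := by
  fun_induction pvFillFwd with
  | case1 j pls hj hne ih =>
    exact ih (fun k => by
      rw [pvGetD_modify]
      split_ifs
      · exact PySem.Set.nodup_add _ _ (h k)
      · exact h k)
  | case2 j pls hj hne => exact h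
  | case3 j pls hj => exact h

lemma mem_updBack (qes : List (List (String × String))) (p : String) (i k : Nat)
    (pls : List (PySem.Set String)) (q : String) (hlen : pls.length = qes.length)
    (hk : k < qes.length) :
    q ∈ (pvFillBack qes p i (pls.modify i (fun t => PySem.Set.add t p))).getD k [] ↔
      q ∈ pls.getD k [] ∨ (q = p ∧ pvCov qes p k i true false) := by
  have hklen : k < pls.length := hlen ▸ hk
  rw [mem_fillBack, pvGetD_modify]
  unfold pvCov
  constructor
  · rintro (hmem | ⟨rfl, h1, h2, h3⟩)
    · split_ifs at hmem with hc
      · rcases (PySem.Set.mem_add _ _ _).mp hmem with hq | rfl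
        · exact Or.inl hq
        · exact Or.inr ⟨rfl, Or.inl hc.1.symm⟩
      · exact Or.inl hmem
    · exact Or.inr ⟨rfl, Or.inr (Or.inl ⟨h1, rfl, h3⟩)⟩
  · rintro (hmem | ⟨rfl, hcov⟩)
    · left
      split_ifs with hc
      · exact (PySem.Set.mem_add _ _ _).mpr (Or.inl hmem)
      · exact hmem
    · rcases hcov with rfl | ⟨h1, _, h3⟩ | ⟨h1, hf, h3⟩
      · left
        rw [if_pos ⟨rfl, hklen⟩]
        exact (PySem.Set.mem_add _ _ _).mpr (Or.inr rfl)
      · exact Or.inr ⟨rfl, h1, by simpa using hklen, h3⟩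
      · exact absurd hf (by simp)

lemma mem_updFwd (qes : List (List (String × String))) (p : String) (i k : Nat)
    (pls : List (PySem.Set String)) (q : String) (hlen : pls.length = qes.length)
    (hk : k < qes.length) :
    q ∈ (pvFillFwd qes p (i + 1) (pls.modify i (fun t => PySem.Set.add t p))).getD k [] ↔
      q ∈ pls.getD k [] ∨ (q = p ∧ pvCov qes p k i false true) := by
  have hklen : k < pls.length := hlen ▸ hk
  rw [mem_fillFwd _ _ _ _ _ (by simp [hlen]), pvGetD_modify]
  unfold pvCov
  constructor
  · rintro (hmem | ⟨rfl, h1, h2, h3⟩)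
    · split_ifs at hmem with hc
      · rcases (PySem.Set.mem_add _ _ _).mp hmem with hq | rfl
        · exact Or.inl hq
        · exact Or.inr ⟨rfl, Or.inl hc.1.symm⟩
      · exact Or.inl hmem
    · exact Or.inr ⟨rfl, Or.inr (Or.inr ⟨by omega, rfl, fun m hm1 hm2 => h3 m hm1 (by omega)⟩)⟩
  · rintro (hmem | ⟨rfl, hcov⟩)
    · left
      split_ifs with hc
      · exact (PySem.Set.mem_add _ _ _).mpr (Or.inl hmem)
      · exact hmem
    · rcases hcov with rfl | ⟨h1, hf, h3⟩ | ⟨h1, _, h3⟩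
      · left
        rw [if_pos ⟨rfl, hklen⟩]
        exact (PySem.Set.mem_add _ _ _).mpr (Or.inr rfl)
      · exact absurd hf (by simp)
      · exact Or.inr ⟨rfl, by omega, hk, fun m hm1 hm2 => h3 m hm1 (by omega)⟩

lemma mem_updBoth (qes : List (List (String × String))) (p : String) (i k : Nat)
    (pls : List (PySem.Set String)) (q : String) (hlen : pls.length = qes.length)
    (hk : k < qes.length) :
    q ∈ (pvFillFwd qes p (i + 1)
        (pvFillBack qes p i (pls.modify i (fun t => PySem.Set.add t p)))).getD k [] ↔
      q ∈ pls.getD k [] ∨ (q = p ∧ pvCov qes p k i true true) := by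
  rw [mem_fillFwd _ _ _ _ _ (by simp [length_fillBack, hlen]), mem_updBack qes p i k pls q hlen hk]
  unfold pvCov
  constructor
  · rintro ((hmem | ⟨rfl, hcov⟩) | ⟨rfl, h1, h2, h3⟩)
    · exact Or.inl hmem
    · rcases hcov with rfl | ⟨hlt, _, h3⟩ | ⟨_, hf, _⟩
      · exact Or.inr ⟨rfl, Or.inl rfl⟩
      · exact Or.inr ⟨rfl, Or.inr (Or.inl ⟨hlt, rfl, h3⟩)⟩
      · exact absurd hf (by simp)
    · exact Or.inr ⟨rfl, Or.inr (Or.inr ⟨by omega, rfl, fun m hm1 hm2 => h3 m hm1 (by omega)⟩)⟩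
  · rintro (hmem | ⟨rfl, hcov⟩)
    · exact Or.inl (Or.inl hmem)
    · rcases hcov with rfl | ⟨hlt, _, h3⟩ | ⟨hgt, _, h3⟩
      · exact Or.inl (Or.inr ⟨rfl, Or.inl rfl⟩)
      · exact Or.inl (Or.inr ⟨rfl, Or.inr (Or.inl ⟨hlt, rfl, h3⟩)⟩)
      · exact Or.inr ⟨rfl, by omega, hk, fun m hm1 hm2 => h3 m hm1 (by omega)⟩

-- A's whole main loop, characterised by the same pvHit predicate
def pvStepA (qes : List (List (String × String))) (team : String)
    (team_names : List String) (pls : List (PySem.Set String)) (i : Nat) :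
    List (PySem.Set String) :=
  let s := qes.getD i []
  if pvGetS s "Team" = team then
    if ¬ (pvGetS s "Event" ∈ (["SUB_IN", "SUB_OUT"] : List String)) then
      if ¬ (PySem.Str.lower (pvGetS s "Player") ∈ team_names) then
        let p := pvGetS s "Player"
        pvFillFwd qes p (i + 1)
          (pvFillBack qes p i (pls.modify i (fun t => PySem.Set.add t p)))
      else pls
    else if pvGetS s "Event" = "SUB_OUT" then
      let p := pvGetS s "Player"
      pvFillBack qes p i (pls.modify i (fun t => PySem.Set.add t p))
    else if pvGetS s "Event" = "SUB_IN" then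
      let p := pvGetS s "Player"
      pvFillFwd qes p (i + 1) (pls.modify i (fun t => PySem.Set.add t p))
    else pls
  else pls

lemma length_stepA (qes : List (List (String × String))) (team : String)
    (team_names : List String) (pls : List (PySem.Set String)) (i : Nat) :
    (pvStepA qes team team_names pls i).length = pls.length := by
  unfold pvStepA
  dsimp only
  split_ifs <;> simp [length_fillBack, length_fillFwd]

lemma nodup_stepA (qes : List (List (String × String))) (team : String)
    (team_names : List String) (pls : List (PySem.Set String)) (i : Nat)
    (h : ∀ k, (pls.getD k []).Nodup) :
    ∀ k, ((pvStepA qes team team_names pls i).getD k []).Nodup := by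
  have hmod : ∀ (p : String) k,
      ((pls.modify i (fun t => PySem.Set.add t p)).getD k []).Nodup := by
    intro p k
    rw [pvGetD_modify]
    split_ifs
    · exact PySem.Set.nodup_add _ _ (h k)
    · exact h k
  unfold pvStepA
  dsimp only
  split_ifs <;>
    first
      | exact h
      | exact nodup_fillFwd _ _ _ _ (nodup_fillBack _ _ _ _ (hmod _))
      | exact nodup_fillBack _ _ _ _ (hmod _)
      | exact nodup_fillFwd _ _ _ _ (hmod _)

lemma mem_stepA (qes : List (List (String × String))) (team : String)
    (team_names : List String) (pls : List (PySem.Set String)) (i k : Nat) (q : String)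
    (hlen : pls.length = qes.length) (_hi : i < qes.length) (hk : k < qes.length) :
    q ∈ (pvStepA qes team team_names pls i).getD k [] ↔
      q ∈ pls.getD k [] ∨ pvHit qes team team_names [i] k q := by
  have hhit : pvHit qes team team_names [i] k q ↔
      ∃ back fwd, pvEvtSpec qes team team_names i q back fwd ∧ pvCov qes q k i back fwd := by
    simp [pvHit]
  rw [hhit]
  simp only [pvEvtSpec]
  unfold pvStepA
  dsimp only
  by_cases ht : pvGetS (qes.getD i []) "Team" = team
  · rw [if_pos ht]
    by_cases hnotin : ¬ pvGetS (qes.getD i []) "Event" ∈ (["SUB_IN", "SUB_OUT"] : List String)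
    · rw [if_pos hnotin]
      have hnotin' : ¬ (pvGetS (qes.getD i []) "Event" = "SUB_IN" ∨
          pvGetS (qes.getD i []) "Event" = "SUB_OUT") := by
        simpa using hnotin
      by_cases htn : PySem.Str.lower (pvGetS (qes.getD i []) "Player") ∈ team_names
      · rw [if_neg (not_not_intro htn)]
        constructor
        · exact Or.inl
        · rintro (h | ⟨back, fwd, ⟨_, rfl, hspec⟩, hcov⟩)
          · exact h
          · rcases hspec with ⟨hs, _⟩ | ⟨_, hns, _⟩
            · exact absurd hs hnotin'
            · exact absurd htn hns
      · rw [if_pos htn, mem_updBoth qes _ i k pls q hlen hk]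
        constructor
        · rintro (h | ⟨rfl, hcov⟩)
          · exact Or.inl h
          · exact Or.inr ⟨true, true, ⟨ht, rfl, Or.inr ⟨hnotin', htn, rfl, rfl⟩⟩, hcov⟩
        · rintro (h | ⟨back, fwd, ⟨_, rfl, hspec⟩, hcov⟩)
          · exact Or.inl h
          · rcases hspec with ⟨hs, _⟩ | ⟨_, _, rfl, rfl⟩
            · exact absurd hs hnotin'
            · exact Or.inr ⟨rfl, hcov⟩
    · rw [if_neg hnotin]
      rw [not_not] at hnotin
      have hin : pvGetS (qes.getD i []) "Event" = "SUB_IN" ∨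
          pvGetS (qes.getD i []) "Event" = "SUB_OUT" := by simpa using hnotin
      by_cases hout : pvGetS (qes.getD i []) "Event" = "SUB_OUT"
      · rw [if_pos hout, mem_updBack qes _ i k pls q hlen hk]
        have hnin : ¬ pvGetS (qes.getD i []) "Event" = "SUB_IN" := by
          rw [hout]; decide
        constructor
        · rintro (h | ⟨rfl, hcov⟩)
          · exact Or.inl h
          · exact Or.inr ⟨true, false, ⟨ht, rfl, Or.inl ⟨hin, by simp only [List.getD_eq_getElem?_getD] at hout; simp [hout], by simp only [List.getD_eq_getElem?_getD] at hnin; simp [hnin]⟩⟩, hcov⟩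
        · rintro (h | ⟨back, fwd, ⟨_, rfl, hspec⟩, hcov⟩)
          · exact Or.inl h
          · rcases hspec with ⟨_, rfl, rfl⟩ | ⟨hns, _⟩
            · rw [show decide (pvGetS (qes.getD i []) "Event" = "SUB_OUT") = true by simp only [List.getD_eq_getElem?_getD] at hout; simp [hout],
                show decide (pvGetS (qes.getD i []) "Event" = "SUB_IN") = false by simp only [List.getD_eq_getElem?_getD] at hnin; simp [hnin]] at hcov
              exact Or.inr ⟨rfl, hcov⟩
            · exact absurd hin hns
      · have hinn : pvGetS (qes.getD i []) "Event" = "SUB_IN" := by tauto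
        rw [if_neg hout, if_pos hinn, mem_updFwd qes _ i k pls q hlen hk]
        constructor
        · rintro (h | ⟨rfl, hcov⟩)
          · exact Or.inl h
          · exact Or.inr ⟨false, true, ⟨ht, rfl, Or.inl ⟨hin, by simp only [List.getD_eq_getElem?_getD] at hout; simp [hout], by simp only [List.getD_eq_getElem?_getD] at hinn; simp [hinn]⟩⟩, hcov⟩
        · rintro (h | ⟨back, fwd, ⟨_, rfl, hspec⟩, hcov⟩)
          · exact Or.inl h
          · rcases hspec with ⟨_, rfl, rfl⟩ | ⟨hns, _⟩
            · rw [show decide (pvGetS (qes.getD i []) "Event" = "SUB_OUT") = false by simp only [List.getD_eq_getElem?_getD] at hout; simp [hout],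
                show decide (pvGetS (qes.getD i []) "Event" = "SUB_IN") = true by simp only [List.getD_eq_getElem?_getD] at hinn; simp [hinn]] at hcov
              exact Or.inr ⟨rfl, hcov⟩
            · exact absurd hin hns
  · rw [if_neg ht]
    constructor
    · exact Or.inl
    · rintro (h | ⟨back, fwd, ⟨hteam, _⟩, _⟩)
      · exact h
      · exact absurd hteam ht

lemma memA (qes : List (List (String × String))) (team : String)
    (team_names : List String) (l : List Nat) (pls : List (PySem.Set String))
    (k : Nat) (q : String) (hlen : pls.length = qes.length) (hk : k < qes.length)
    (hl : ∀ i ∈ l, i < qes.length) :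
    q ∈ (l.foldl (pvStepA qes team team_names) pls).getD k [] ↔
      q ∈ pls.getD k [] ∨ pvHit qes team team_names l k q := by
  induction l generalizing pls with
  | nil => simp [pvHit]
  | cons i l ih =>
    rw [List.foldl_cons,
      ih _ (by rw [length_stepA, hlen]) (fun j hj => hl j (List.mem_cons_of_mem _ hj)),
      mem_stepA qes team team_names pls i k q hlen (hl i (List.mem_cons_self ..)) hk]
    simp only [pvHit, List.mem_cons, List.not_mem_nil, or_false, exists_eq_left]
    constructor
    · rintro ((h | hstep) | ⟨i', hi', hrest⟩)
      · exact Or.inl h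
      · exact Or.inr ⟨i, Or.inl rfl, hstep⟩
      · exact Or.inr ⟨i', Or.inr hi', hrest⟩
    · rintro (h | ⟨i', rfl | hi', hrest⟩)
      · exact Or.inl (Or.inl h)
      · exact Or.inl (Or.inr hrest)
      · exact Or.inr ⟨i', hi', hrest⟩

lemma lengthA_foldl (qes : List (List (String × String))) (team : String)
    (team_names : List String) (l : List Nat) (pls : List (PySem.Set String)) :
    (l.foldl (pvStepA qes team team_names) pls).length = pls.length := by
  induction l generalizing pls with
  | nil => rfl
  | cons i l ih => rw [List.foldl_cons, ih, length_stepA]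

lemma nodupA_foldl (qes : List (List (String × String))) (team : String)
    (team_names : List String) (l : List Nat) (pls : List (PySem.Set String))
    (h : ∀ k, (pls.getD k []).Nodup) :
    ∀ k, ((l.foldl (pvStepA qes team team_names) pls).getD k []).Nodup := by
  induction l generalizing pls with
  | nil => exact h
  | cons i l ih => exact ih _ (nodup_stepA qes team team_names pls i h)

-- ===== VERDICT (by name: the statement is the Claim_ definition above) =====
theorem playersForEventsQuarter_spec : Claim_equal_playersForEventsQuarter := by
  unfold Claim_equal_playersForEventsQuarter
  intro qes team lookup team_names hdom hpre
  unfold Spec_playersForEventsQuarter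
  show (((List.range qes.length).foldl (pvStepA qes team team_names)
        (qes.map (fun _ => ([] : PySem.Set String)))).map
      (fun pl => PySem.List.sorted (pl.map (fun q => ((PySem.Dict.mk lookup).get? q).getD 0)) (fun x => x) false)) =
    (List.range qes.length).map (fun k =>
      PySem.List.sorted
        (((List.range qes.length).foldl (pvStepB qes team team_names k) PySem.Set.empty).map
          (fun q => ((PySem.Dict.mk lookup).get? q).getD 0)) (fun x => x) false)
  have hlen0 : (qes.map (fun _ => ([] : PySem.Set String))).length = qes.length := by simp
  have h0 : ∀ k, ((qes.map (fun _ => ([] : PySem.Set String))).getD k []).Nodup := by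
    intro k
    by_cases hk : k < qes.length
    · rw [List.getD_eq_getElem _ _ (by simpa using hk), List.getElem_map]
      exact List.nodup_nil
    · rw [List.getD_eq_default _ _ (by simpa using Nat.le_of_not_lt hk)]
      exact List.nodup_nil
  apply List.ext_getElem
  · simp [lengthA_foldl]
  intro k h1 h2
  have hk : k < qes.length := by
    simpa [lengthA_foldl, hlen0] using h1
  rw [List.getElem_map, List.getElem_map, List.getElem_range]
  apply PySem.List.sorted_eq_sorted_of_perm _ _ _ (fun a b h => h)
  apply List.Perm.map
  rw [List.getD_eq_getElem _ ([] : PySem.Set String)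
    (by simpa [lengthA_foldl, hlen0] using hk) |>.symm]
  rw [List.perm_ext_iff_of_nodup
    (nodupA_foldl qes team team_names (List.range qes.length)
      (qes.map (fun _ => ([] : PySem.Set String))) h0 k)
    (nodupB qes team team_names (List.range qes.length) k PySem.Set.empty List.nodup_nil)]
  intro q
  rw [memA qes team team_names (List.range qes.length)
      (qes.map (fun _ => ([] : PySem.Set String))) k q hlen0 hk
      (fun i hi => List.mem_range.mp hi),
    memB qes team team_names (List.range qes.length) k q PySem.Set.empty]
  have hinit : (qes.map (fun _ => ([] : PySem.Set String))).getD k [] = [] := by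
    rw [List.getD_eq_getElem _ _ (by simpa using hk), List.getElem_map]
  rw [hinit]
  simp [PySem.Set.empty]
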